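-- pv_equiv track=rewrite | github.com/jwoglom/ionbot | scripts/parsedata.py | get_winners
-- ===== SOURCE A (Python) =====
-- import collections
--
-- def get_winners(polls, responses):
--     winners = {}
--     for pid in polls.keys():
--         ranking = collections.defaultdict(list)
--         for response, voters in responses[pid].items():
--             num = len(voters)
--             ranking[num].append(response)
--         if ranking:
--             high = max(ranking)
--             if len(ranking[high]) == 1:
--                 winners[pid] = "The winner is %s with %d votes." % (ranking[high][0], high)
--             else:
--                 winners[pid] = "Tie between %s with %d votes." % (", ".join(ranking[high]), high)
--         else:
--             winners[pid] = ""
--     return winners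
-- ===== SOURCE B (Python) =====
-- def get_winners(polls, responses):
--     winners = {}
--     for pid in polls:
--         best = -1
--         leaders = []
--         for response, voters in responses[pid].items():
--             n = len(voters)
--             if n > best:
--                 best = n
--                 leaders = [response]
--             elif n == best:
--                 leaders.append(response)
--         if not leaders:
--             winners[pid] = ""
--         elif len(leaders) == 1:
--             winners[pid] = "The winner is %s with %d votes." % (leaders[0], best)
--         else:
--             winners[pid] = "Tie between %s with %d votes." % (", ".join(leaders), best)
--     return winners
-- ===== Notes on version B (the rewrite author's own statement) =====
-- stated objective: simpler
-- what changed: Replaces the per-poll vote-count histogram (defaultdict keyed by count, then max over keys and a lookup) with a single pass over the responses that tracks the running best count and the list of leaders at that count.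
import Mathlib
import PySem

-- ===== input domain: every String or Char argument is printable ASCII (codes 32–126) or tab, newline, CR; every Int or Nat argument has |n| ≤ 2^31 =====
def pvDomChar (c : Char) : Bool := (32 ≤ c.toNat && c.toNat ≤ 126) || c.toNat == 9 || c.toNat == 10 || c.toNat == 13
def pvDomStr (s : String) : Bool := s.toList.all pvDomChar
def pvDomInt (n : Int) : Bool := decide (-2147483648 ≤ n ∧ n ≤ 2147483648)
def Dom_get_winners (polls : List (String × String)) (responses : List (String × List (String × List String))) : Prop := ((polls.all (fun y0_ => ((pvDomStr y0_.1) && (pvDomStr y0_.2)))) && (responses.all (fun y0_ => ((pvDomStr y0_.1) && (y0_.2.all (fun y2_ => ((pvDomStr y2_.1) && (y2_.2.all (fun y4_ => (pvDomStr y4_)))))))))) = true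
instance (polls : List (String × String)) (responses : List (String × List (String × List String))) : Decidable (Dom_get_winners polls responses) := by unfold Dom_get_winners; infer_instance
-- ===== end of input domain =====

-- B replaces A's per-poll vote-count histogram + max-over-keys with a single pass
-- tracking the running best count and the current leaders (objective: simpler).

-- ===== PORT A =====
-- one poll's message in A: build ranking (vote count -> responses), max over counts
def pvMsgA (l : List (String × List String)) : String :=
  let ranking := l.foldl (fun d p => d.modify ((p.2.length : Int)) [] (· ++ [p.1])) PySem.Dict.empty
  if ranking.items ≠ [] then
    match PySem.List.max? ranking.keys (fun x => x) with
    | some high =>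
        let lst := ranking.getD high []
        if lst.length = 1 then
          "The winner is " ++ PySem.List.pyGetD lst 0 "" ++ " with " ++ PySem.Int.toStr high ++ " votes."
        else
          "Tie between " ++ PySem.Str.join ", " lst ++ " with " ++ PySem.Int.toStr high ++ " votes."
    | none => ""
  else ""


def get_winners (polls : List (String × String)) (responses : List (String × List (String × List String))) : List (String × String) :=
  -- responses[pid]: dict lookup, total form getD under Pre_ (pid present)
  (((PySem.Dict.mk polls).keys).foldl
    (fun (w : PySem.Dict String String) pid =>
      w.insert pid (pvMsgA ((PySem.Dict.mk responses).getD pid [])))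
    PySem.Dict.empty).items

-- ===== PORT B =====
-- one poll in B: a single pass keeping (best count so far, leaders at that count)
def pvLoopB (l : List (String × List String)) : Int × List String :=
  l.foldl (fun s p =>
    let n : Int := (p.2.length : Int)
    if n > s.1 then (n, [p.1])
    else if n = s.1 then (s.1, s.2 ++ [p.1])
    else s) (-1, [])

def pvMsgB (l : List (String × List String)) : String :=
  let s := pvLoopB l
  if s.2 = [] then ""
  else if s.2.length = 1 then
    "The winner is " ++ PySem.List.pyGetD s.2 0 "" ++ " with " ++ PySem.Int.toStr s.1 ++ " votes."
  else
    "Tie between " ++ PySem.Str.join ", " s.2 ++ " with " ++ PySem.Int.toStr s.1 ++ " votes."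

def get_winners_alt (polls : List (String × String)) (responses : List (String × List (String × List String))) : List (String × String) :=
  (((PySem.Dict.mk polls).keys).foldl
    (fun (w : PySem.Dict String String) pid =>
      w.insert pid (pvMsgB ((PySem.Dict.mk responses).getD pid [])))
    PySem.Dict.empty).items

-- ===== PRECONDITION & SPEC =====
-- Pre_: A evaluates responses[pid] for every poll id — a pid missing from responses is a KeyError in A.
def Pre_get_winners (polls : List (String × String)) (responses : List (String × List (String × List String))) : Prop :=
  ∀ p ∈ polls, (PySem.Dict.mk responses).contains p.1 = true
instance (polls : List (String × String)) (responses : List (String × List (String × List String))) : Decidable (Pre_get_winners polls responses) := by unfold Pre_get_winners; infer_instance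

def pvWitness_get_winners : (List (String × String)) × (List (String × List (String × List String))) :=
  ([("p1", "Best color?")], [("p1", [("red", ["a", "b"]), ("blue", ["c"])])])

def Spec_get_winners (polls : List (String × String)) (responses : List (String × List (String × List String))) (out : List (String × String)) : Prop := out = get_winners_alt polls responses
instance (polls : List (String × String)) (responses : List (String × List (String × List String))) (out : List (String × String)) : Decidable (Spec_get_winners polls responses out) := by unfold Spec_get_winners; infer_instance

-- ===== CLAIM (what is proved, stated in full; the proofs are below) =====
def Claim_equal_get_winners : Prop := ∀ (polls : List (String × String)) (responses : List (String × List (String × List String))), Dom_get_winners polls responses → Pre_get_winners polls responses → Spec_get_winners polls responses (get_winners polls responses)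

-- ===== LEMMAS AND PROOFS =====

theorem pv_foldl_max_const (t : List Int) (b : Int) (h : ∀ y ∈ t, y ≤ b) :
    t.foldl max b = b := by
  induction t with
  | nil => rfl
  | cons k t ih =>
      have hk : k ≤ b := h k (by simp)
      simp only [List.foldl_cons, max_eq_left hk]
      exact ih (fun y hy => h y (by simp [hy]))

theorem pv_foldl_max_eq (t : List Int) (b H : Int) (hmem : H ∈ t)
    (hub : ∀ y ∈ t, y ≤ H) (hb : b ≤ H) : t.foldl max b = H := by
  induction t generalizing b with
  | nil => cases hmem
  | cons k t ih =>
      have hk : k ≤ H := hub k (by simp)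
      simp only [List.foldl_cons]
      rcases List.mem_cons.mp hmem with rfl | hmem'
      · by_cases ht : H ∈ t
        · exact ih (max b H) ht (fun y hy => hub y (List.mem_cons_of_mem _ hy)) (max_le hb le_rfl)
        · rw [max_eq_right hb]
          exact pv_foldl_max_const t H (fun y hy => hub y (List.mem_cons_of_mem _ hy))
      · exact ih (max b k) hmem' (fun y hy => hub y (List.mem_cons_of_mem _ hy)) (max_le hb hk)

theorem pv_loopB_spec (l : List (String × List String)) (b : Int) (ld : List String) :
    l.foldl (fun s p =>
      let n : Int := (p.2.length : Int)
      if n > s.1 then (n, [p.1])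
      else if n = s.1 then (s.1, s.2 ++ [p.1])
      else s) (b, ld)
    = ((l.map (fun p => ((p.2.length : Int)))).foldl max b,
       (if (l.map (fun p => ((p.2.length : Int)))).foldl max b = b then ld else [])
         ++ (l.filter (fun p => ((p.2.length : Int)) = (l.map (fun p => ((p.2.length : Int)))).foldl max b)).map (·.1)) := by
  induction l generalizing b ld with
  | nil => simp
  | cons x t ih =>
      have hmono : ∀ (c : Int), c ≤ (t.map (fun p => ((p.2.length : Int)))).foldl max c :=
        fun c => (PySem.List.le_foldl_max (t.map (fun p => ((p.2.length : Int)))) c).1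
      simp only [List.foldl_cons, List.map_cons, List.filter_cons]
      by_cases h1 : ((x.2.length : Int)) > b
      · rw [if_pos h1, ih]
        simp only [max_eq_right (le_of_lt h1)]
        set k : Int := (x.2.length : Int) with hkdef
        set B := (t.map (fun p => ((p.2.length : Int)))).foldl max k with hB
        have hkB : k ≤ B := hmono k
        rw [if_neg (show ¬ (B = b) by omega)]
        by_cases h2 : k = B
        · simp [h2]
        · rw [if_neg (show ¬ (B = k) from fun h => h2 h.symm), if_neg (by simpa using h2)]
      · rw [if_neg h1]
        replace h1 : ((x.2.length : Int)) ≤ b := by omega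
        by_cases h2 : ((x.2.length : Int)) = b
        · rw [if_pos h2, ih]
          simp only [max_eq_left h1]
          set k : Int := (x.2.length : Int) with hkdef
          set B := (t.map (fun p => ((p.2.length : Int)))).foldl max b with hB
          have hbB : b ≤ B := hmono b
          by_cases h3 : B = b
          · simp [h3, h2]
          · rw [if_neg h3, if_neg h3]
            simp only [decide_eq_true_eq]
            rw [if_neg (show ¬ (k = B) by omega)]
        · rw [if_neg h2, ih]
          simp only [max_eq_left h1]
          set B := (t.map (fun p => ((p.2.length : Int)))).foldl max b with hB
          have hbB : b ≤ B := hmono b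
          have hkb : (x.2.length : Int) < b := lt_of_le_of_ne h1 h2
          simp only [decide_eq_true_eq]
          rw [if_neg (show ¬ ((x.2.length : Int) = B) by omega)]
theorem pv_msg_eq (l : List (String × List String)) : pvMsgA l = pvMsgB l := by
  rcases l with _ | ⟨x, t⟩
  · rfl
  · set l := x :: t with hl
    unfold pvMsgA pvMsgB pvLoopB
    rw [pv_loopB_spec]
    set key : (String × List String) → Int := fun p => (p.2.length : Int) with hkey
    set ranking := l.foldl (fun d p => d.modify ((p.2.length : Int)) [] (· ++ [p.1])) PySem.Dict.empty with hrk
    have hkeys : ranking.keys = PySem.Set.ofList (l.map key) := by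
      rw [hrk, show (fun (d : PySem.Dict Int (List String)) (p : String × List String) => d.modify ((p.2.length : Int)) [] (· ++ [p.1]))
            = (fun d p => d.modify (key p) [] ((fun _ p => fun v => v ++ [p.1]) d p)) from rfl,
          PySem.Dict.keys_foldl_modify_key l key [] _ PySem.Dict.empty,
          PySem.Dict.keys_empty, PySem.Set.ofList_eq_foldl]
      rfl
    have hlst : ∀ H : Int, ranking.getD H [] = (l.filter (fun p => key p == H)).map (·.1) := by
      intro H
      rw [hrk, show (l.foldl (fun d p => d.modify ((p.2.length : Int)) [] (· ++ [p.1])) PySem.Dict.empty)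
            = ((l.map (fun p => (key p, p.1))).foldl (fun d q => d.modify q.1 [] (· ++ [q.2])) PySem.Dict.empty) from (List.foldl_map (f := fun p => (key p, p.1)) (g := fun d q => PySem.Dict.modify d q.1 [] (· ++ [q.2])) (l := l) (init := PySem.Dict.empty)).symm,
          PySem.Dict.getD_foldl_modify_append]
      simp [List.filter_map, Function.comp_def]
    obtain ⟨H, hH⟩ : ∃ H, PySem.List.max? ranking.keys (fun x => x) = some H := by
      cases hmm : PySem.List.max? ranking.keys (fun x => x) with
      | none =>
          rw [PySem.List.max?_eq_none_iff, hkeys] at hmm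
          have hx : key x ∈ PySem.Set.ofList (l.map key) := by
            rw [PySem.Set.mem_ofList]; simp [hl]
          rw [hmm] at hx
          exact absurd hx (List.not_mem_nil)
      | some H => exact ⟨H, rfl⟩
    have hHmem : H ∈ l.map key := (PySem.Set.mem_ofList _ _).mp (by rw [← hkeys]; exact PySem.List.max?_mem hH)
    have hub : ∀ y ∈ l.map key, y ≤ H := fun y hy =>
      PySem.List.max?_isMax hH y (by rw [hkeys, PySem.Set.mem_ofList]; exact hy)
    have hHnn : 0 ≤ H := by
      rcases List.mem_map.mp hHmem with ⟨p, _, hp⟩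
      rw [← hp]; exact Int.natCast_nonneg _
    have hfold : (l.map key).foldl max (-1) = H := pv_foldl_max_eq _ _ _ hHmem hub (by omega)
    have hitems : ranking.items ≠ [] := by
      intro h
      have hkeq : ranking.keys = [] := by simp [PySem.Dict.keys, h]
      have hx : key x ∈ ranking.keys := by rw [hkeys, PySem.Set.mem_ofList]; simp [hl]
      rw [hkeq] at hx
      exact absurd hx (List.not_mem_nil)
    have hfiltc : l.filter (fun p => key p == H) = l.filter (fun p => decide (key p = H)) := by
      apply List.filter_congr
      intro p _
      by_cases h : key p = H <;> simp [h]
    have hlead : (l.filter (fun p => decide (key p = H))).map (·.1) ≠ [] := by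
      rcases List.mem_map.mp hHmem with ⟨p, hpl, hp⟩
      have : p ∈ l.filter (fun p => decide (key p = H)) := by
        rw [List.mem_filter]; exact ⟨hpl, by simp [hp]⟩
      intro h
      exact absurd (List.mem_map_of_mem (f := (·.1)) this) (by rw [h]; exact List.not_mem_nil)
    rw [if_pos hitems, hH]
    simp only [hfold, hlst H, hfiltc]
    simp only [hkey] at hlead ⊢
    simp only [ite_self, List.nil_append]
    rw [if_neg hlead]

-- ===== VERDICT (by name: the statement is the Claim_ definition above) =====
theorem get_winners_spec : Claim_equal_get_winners := by
  intro polls responses _ _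
  unfold Spec_get_winners get_winners get_winners_alt
  rw [funext pv_msg_eq]
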